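-- pv_equiv track=rewrite | github.com/Almax84/ComputerScienceDegree_ProgrammiFundamentals | esercizi_2018/listaEsercizi2.py | es3
-- ===== SOURCE A (Python) =====
-- def es3(st1,st2):
--     '''la funzione stampa le sottostringhe di almeno due caratteri comuni alle due stringhe
--     datein input. Le sottostringhe vanno stampate in ordine lessicografico crescente e
--     separate tra loro da un semplice spazio. Nota se una stessa sottostringa
--     compare piu' volte va stampata un'unica volta'''
--     len_st1 = len(st1)
--     result_list = []
--     for i in range(2,len_st1):
--         for j in range(len_st1):
--             #i = substring length e.g. if i = 2 and j =0 find all substrings of length 2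
--             st1_substring = st1[j:j+i]
--             if st1_substring in st2 and st1_substring not in result_list and len(st1_substring)>=2:
--                 result_list.append(st1_substring)
--     return ' '.join(sorted(result_list))
-- ===== SOURCE B (Python) =====
-- def es3(st1, st2):
--     n, m = len(st1), len(st2)
--     subs1 = {st1[j:j + L] for L in range(2, n) for j in range(n - L + 1)}
--     subs2 = {st2[i:k] for i in range(m) for k in range(i + 2, m + 1)}
--     return ' '.join(sorted(subs1 & subs2))
-- ===== Notes on version B (the rewrite author's own statement) =====
-- stated objective: faster
-- what changed: Replaces A's nested loop with per-candidate substring search in st2 and a linear 'not in result_list' dedup scan by enumerating the two substring sets once (st1's substrings of length 2..len(st1)-1 and st2's substrings of length >= 2) and taking a hash-set intersection.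
import Mathlib
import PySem

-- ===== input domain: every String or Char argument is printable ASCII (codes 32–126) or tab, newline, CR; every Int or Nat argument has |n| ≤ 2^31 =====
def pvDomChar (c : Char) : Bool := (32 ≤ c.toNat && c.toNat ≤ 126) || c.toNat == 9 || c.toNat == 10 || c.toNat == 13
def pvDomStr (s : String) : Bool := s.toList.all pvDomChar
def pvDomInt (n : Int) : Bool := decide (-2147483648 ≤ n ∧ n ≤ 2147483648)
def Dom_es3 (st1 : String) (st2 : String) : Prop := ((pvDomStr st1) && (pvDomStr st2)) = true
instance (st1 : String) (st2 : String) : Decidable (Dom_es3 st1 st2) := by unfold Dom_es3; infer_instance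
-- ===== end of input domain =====

-- B replaces A's nested search loop (substring test + linear dedup scan) by building the two
-- substring sets once and intersecting them (objective: faster, measured; same result, total).

-- ===== PORT A =====
def es3 (st1 : String) (st2 : String) : String :=
  let len_st1 := PySem.Str.len st1
  let result_list :=
    (PySem.List.pyRange 2 len_st1).foldl (fun acc i =>
      (PySem.List.pyRange 0 len_st1).foldl (fun acc j =>
        let st1_substring := PySem.Str.slice st1 (some j) (some (j + i))
        if PySem.Str.isIn st1_substring st2 = true ∧ st1_substring ∉ acc ∧
            2 ≤ PySem.Str.len st1_substring
        then acc ++ [st1_substring] else acc) acc) ([] : List String)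
  PySem.Str.join " " (PySem.List.sorted result_list (fun x => x))

-- ===== PORT B =====
def es3_alt (st1 : String) (st2 : String) : String :=
  let n := PySem.Str.len st1
  let m := PySem.Str.len st2
  let subs1 : PySem.Set String := PySem.Set.ofList
    ((PySem.List.pyRange 2 n).flatMap (fun L =>
      (PySem.List.pyRange 0 (n - L + 1)).map (fun j =>
        PySem.Str.slice st1 (some j) (some (j + L)))))
  let subs2 : PySem.Set String := PySem.Set.ofList
    ((PySem.List.pyRange 0 m).flatMap (fun i =>
      (PySem.List.pyRange (i + 2) (m + 1)).map (fun k =>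
        PySem.Str.slice st2 (some i) (some k))))
  PySem.Str.join " " (PySem.List.sorted (PySem.Set.inter subs1 subs2) (fun x => x))

-- ===== PRECONDITION & SPEC =====
def Spec_es3 (st1 : String) (st2 : String) (out : String) : Prop := out = es3_alt st1 st2
instance (st1 : String) (st2 : String) (out : String) : Decidable (Spec_es3 st1 st2 out) := by unfold Spec_es3; infer_instance

-- ===== CLAIM (what is proved, stated in full; the proofs are below) =====
def Claim_equal_es3 : Prop := ∀ (st1 : String) (st2 : String), Dom_es3 st1 st2 → Spec_es3 st1 st2 (es3 st1 st2)

-- ===== LEMMAS AND PROOFS =====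

-- a substring of t of length L, 2 ≤ L ≤ t.length - 1, starting at j
def IsMidSub (t x : List Char) : Prop :=
  ∃ (j L : Nat), 2 ≤ L ∧ L < t.length ∧ j + L ≤ t.length ∧ x = (t.drop j).take L

lemma take_drop_of_len (t x : List Char) (j L : Nat) (hjL : j + L ≤ t.length)
    (hx : x = (t.drop j).take L) : x.length = L := by
  subst hx
  simp [List.length_take, List.length_drop]
  omega

-- A's candidate slices (with the length-≥-2 filter) are exactly the mid-length substrings
lemma candA_iff (st1 : String) (x : String) :
    ((∃ i, (2 ≤ i ∧ i < PySem.Str.len st1) ∧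
      ∃ j, (0 ≤ j ∧ j < PySem.Str.len st1) ∧
        x = PySem.Str.slice st1 (some j) (some (j + i))) ∧ 2 ≤ PySem.Str.len x)
    ↔ IsMidSub st1.toList x.toList := by
  constructor
  · rintro ⟨⟨i, ⟨hi2, hin⟩, j, ⟨hj0, hjn⟩, hx⟩, hlen⟩
    have hxl : x.toList = (st1.toList.drop j.toNat).take i.toNat := by
      rw [hx, PySem.Str.toList_slice]
      rw [show PySem.Chars.slice st1.toList (some j) (some (j + i)) =
        PySem.List.slice st1.toList (some j) (some (j + i)) from rfl]
      rw [PySem.List.slice_toNat st1.toList hj0 (by omega)]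
      congr 1
      omega
    -- take the actual length as L
    refine ⟨j.toNat, x.toList.length, ?_, ?_, ?_, ?_⟩
    · have := PySem.Str.len_eq x; omega
    · have h1 : x.toList.length ≤ i.toNat := by
        rw [hxl]; simp [List.length_take]
      have h2 : i.toNat < st1.toList.length := by
        have := PySem.Str.len_eq st1; omega
      omega
    · have : x.toList.length ≤ st1.toList.length - j.toNat := by
        rw [hxl]; simp [List.length_take, List.length_drop]
      have hj : j.toNat ≤ st1.toList.length := by
        have := PySem.Str.len_eq st1; omega
      omega
    · rw [hxl, List.length_take, ← List.take_take, List.take_length]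
  · rintro ⟨j, L, h2, hLn, hjL, hx⟩
    have hn := PySem.Str.len_eq st1
    have hxlen : x.toList.length = L := take_drop_of_len _ _ _ _ hjL hx
    constructor
    · refine ⟨(L : Int), ⟨by omega, by omega⟩, (j : Int), ⟨by omega, by omega⟩, ?_⟩
      apply String.ext
      rw [PySem.Str.toList_slice]
      rw [show PySem.Chars.slice st1.toList (some (j:Int)) (some ((j:Int) + L)) =
        PySem.List.slice st1.toList (some (j:Int)) (some ((j:Int) + L)) from rfl]
      rw [PySem.List.slice_toNat st1.toList (by omega) (by omega)]
      rw [hx]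
      congr 1
      omega
    · have := PySem.Str.len_eq x; omega

-- B's first comprehension enumerates exactly the mid-length substrings of st1
lemma cand1_iff (st1 : String) (x : String) :
    (∃ L, (2 ≤ L ∧ L < PySem.Str.len st1) ∧
      ∃ j, (0 ≤ j ∧ j < PySem.Str.len st1 - L + 1) ∧
        x = PySem.Str.slice st1 (some j) (some (j + L)))
    ↔ IsMidSub st1.toList x.toList := by
  have hn := PySem.Str.len_eq st1
  constructor
  · rintro ⟨L, ⟨hL2, hLn⟩, j, ⟨hj0, hjn⟩, hx⟩
    refine ⟨j.toNat, L.toNat, by omega, by omega, by omega, ?_⟩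
    rw [hx, PySem.Str.toList_slice]
    rw [show PySem.Chars.slice st1.toList (some j) (some (j + L)) =
      PySem.List.slice st1.toList (some j) (some (j + L)) from rfl]
    rw [PySem.List.slice_toNat st1.toList hj0 (by omega)]
    congr 1
    omega
  · rintro ⟨j, L, h2, hLn, hjL, hx⟩
    refine ⟨(L : Int), ⟨by omega, by omega⟩, (j : Int), ⟨by omega, by omega⟩, ?_⟩
    apply String.ext
    rw [PySem.Str.toList_slice]
    rw [show PySem.Chars.slice st1.toList (some (j:Int)) (some ((j:Int) + L)) =
      PySem.List.slice st1.toList (some (j:Int)) (some ((j:Int) + L)) from rfl]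
    rw [PySem.List.slice_toNat st1.toList (by omega) (by omega)]
    rw [hx]
    congr 1
    omega

-- B's second comprehension enumerates exactly the infixes of st2 of length ≥ 2
lemma cand2_iff (st2 : String) (x : String) :
    (∃ i, (0 ≤ i ∧ i < PySem.Str.len st2) ∧
      ∃ k, (i + 2 ≤ k ∧ k < PySem.Str.len st2 + 1) ∧
        x = PySem.Str.slice st2 (some i) (some k))
    ↔ (2 ≤ x.toList.length ∧ x.toList <:+: st2.toList) := by
  have hm := PySem.Str.len_eq st2
  constructor
  · rintro ⟨i, ⟨hi0, him⟩, k, ⟨hk2, hkm⟩, hx⟩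
    have hxl : x.toList = (st2.toList.drop i.toNat).take (k.toNat - i.toNat) := by
      rw [hx, PySem.Str.toList_slice]
      rw [show PySem.Chars.slice st2.toList (some i) (some k) =
        PySem.List.slice st2.toList (some i) (some k) from rfl]
      rw [PySem.List.slice_toNat st2.toList hi0 (by omega)]
    constructor
    · rw [hxl]
      simp only [List.length_take, List.length_drop]
      omega
    · rw [hxl]
      exact ((List.take_prefix (k.toNat - i.toNat) (st2.toList.drop i.toNat)).isInfix).trans
        (List.drop_suffix i.toNat st2.toList).isInfix
  · rintro ⟨hlen, pre, suf, hsplit⟩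
    refine ⟨(pre.length : Int), ⟨by omega, ?_⟩,
      (pre.length : Int) + (x.toList.length : Int), ⟨by omega, ?_⟩, ?_⟩
    · have : pre.length + x.toList.length + suf.length = st2.toList.length := by
        rw [← hsplit]; simp only [List.length_append]
      omega
    · have : pre.length + x.toList.length + suf.length = st2.toList.length := by
        rw [← hsplit]; simp only [List.length_append]
      omega
    · apply String.ext
      rw [PySem.Str.toList_slice]
      rw [show PySem.Chars.slice st2.toList (some (pre.length:Int))
        (some ((pre.length:Int) + (x.toList.length:Int))) =
        PySem.List.slice st2.toList (some (pre.length:Int))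
        (some ((pre.length:Int) + (x.toList.length:Int))) from rfl]
      rw [PySem.List.slice_toNat st2.toList (by omega) (by omega)]
      rw [← hsplit]
      rw [show ((pre.length:Int) + (x.toList.length:Int)).toNat - ((pre.length:Int)).toNat
        = x.toList.length by omega]
      rw [show ((pre.length:Int)).toNat = pre.length by omega]
      rw [List.append_assoc, List.drop_left, List.take_left]

-- the dedup-append loop body is Set.add behind the filter condition
lemma body_eq (st2 : String) (acc : List String) (s : String) :
    (if PySem.Str.isIn s st2 = true ∧ s ∉ acc ∧ 2 ≤ PySem.Str.len s
      then acc ++ [s] else acc)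
    = (if PySem.Str.isIn s st2 = true ∧ 2 ≤ PySem.Str.len s
      then PySem.Set.add acc s else acc) := by
  by_cases h3 : s ∈ acc
  · by_cases hc : PySem.Str.isIn s st2 = true ∧ 2 ≤ PySem.Str.len s
    · rw [if_neg (by tauto), if_pos hc, PySem.Set.add_of_mem h3]
    · rw [if_neg (by tauto), if_neg hc]
  · by_cases hc : PySem.Str.isIn s st2 = true ∧ 2 ≤ PySem.Str.len s
    · rw [if_pos ⟨hc.1, h3, hc.2⟩, if_pos hc, PySem.Set.add_of_not_mem h3]
    · rw [if_neg (by tauto), if_neg hc]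

-- A's result list is the set of filtered candidates
lemma resultA_eq (st1 st2 : String) :
    ((PySem.List.pyRange 2 (PySem.Str.len st1)).foldl (fun acc i =>
      (PySem.List.pyRange 0 (PySem.Str.len st1)).foldl (fun acc j =>
        let st1_substring := PySem.Str.slice st1 (some j) (some (j + i))
        if PySem.Str.isIn st1_substring st2 = true ∧ st1_substring ∉ acc ∧
            2 ≤ PySem.Str.len st1_substring
        then acc ++ [st1_substring] else acc) acc) ([] : List String))
    = PySem.Set.ofList
        (((PySem.List.pyRange 2 (PySem.Str.len st1)).flatMap (fun i =>
          (PySem.List.pyRange 0 (PySem.Str.len st1)).map (fun j =>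
            PySem.Str.slice st1 (some j) (some (j + i))))).filter
          (fun s => decide (PySem.Str.isIn s st2 = true ∧ 2 ≤ PySem.Str.len s))) := by
  rw [PySem.Set.ofList_eq_foldl,
    ← PySem.List.foldl_ite_eq_foldl_filter
      (fun s => PySem.Str.isIn s st2 = true ∧ 2 ≤ PySem.Str.len s) PySem.Set.add,
    List.foldl_flatMap]
  simp only [List.foldl_map]
  apply PySem.List.foldl_congr_mem
  intro acc i _
  apply PySem.List.foldl_congr_mem
  intro acc' j _
  exact body_eq st2 acc' _

lemma sorted_arg_eq (st1 st2 : String) :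
    PySem.List.sorted
      ((PySem.List.pyRange 2 (PySem.Str.len st1)).foldl (fun acc i =>
        (PySem.List.pyRange 0 (PySem.Str.len st1)).foldl (fun acc j =>
          let st1_substring := PySem.Str.slice st1 (some j) (some (j + i))
          if PySem.Str.isIn st1_substring st2 = true ∧ st1_substring ∉ acc ∧
              2 ≤ PySem.Str.len st1_substring
          then acc ++ [st1_substring] else acc) acc) ([] : List String))
      (fun x => x)
    = PySem.List.sorted
        (PySem.Set.inter
          (PySem.Set.ofList
            ((PySem.List.pyRange 2 (PySem.Str.len st1)).flatMap (fun L =>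
              (PySem.List.pyRange 0 (PySem.Str.len st1 - L + 1)).map (fun j =>
                PySem.Str.slice st1 (some j) (some (j + L))))))
          (PySem.Set.ofList
            ((PySem.List.pyRange 0 (PySem.Str.len st2)).flatMap (fun i =>
              (PySem.List.pyRange (i + 2) (PySem.Str.len st2 + 1)).map (fun k =>
                PySem.Str.slice st2 (some i) (some k))))))
        (fun x => x) := by
  rw [resultA_eq]
  rw [PySem.List.sorted_id_eq_sorted_id_iff_perm]
  rw [List.perm_ext_iff_of_nodup (PySem.Set.nodup_ofList _)
    (PySem.Set.nodup_inter _ _ (PySem.Set.nodup_ofList _))]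
  intro a
  rw [PySem.Set.mem_ofList, PySem.Set.mem_inter, PySem.Set.mem_ofList, PySem.Set.mem_ofList]
  simp only [List.mem_filter, List.mem_flatMap, List.mem_map, PySem.List.mem_pyRange_one,
    decide_eq_true_eq]
  constructor
  · rintro ⟨hcand, hfilt⟩
    obtain ⟨hin, hlen⟩ := hfilt
    have hmid : IsMidSub st1.toList a.toList := by
      rw [← candA_iff st1 a]
      refine ⟨?_, hlen⟩
      obtain ⟨i, hi, j, hj, ha⟩ := hcand
      exact ⟨i, hi, j, hj, ha.symm⟩
    constructor
    · obtain ⟨L, hL, j, hj, ha⟩ := (cand1_iff st1 a).2 hmid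
      exact ⟨L, hL, j, hj, ha.symm⟩
    · have hlen2 : 2 ≤ a.toList.length := by
        have := PySem.Str.len_eq a; omega
      obtain ⟨i, hi, k, hk, ha⟩ := (cand2_iff st2 a).2
        ⟨hlen2, (PySem.Str.isIn_iff_infix a st2).1 hin⟩
      exact ⟨i, hi, k, hk, ha.symm⟩
  · rintro ⟨h1, h2⟩
    have hmid : IsMidSub st1.toList a.toList := by
      rw [← cand1_iff st1 a]
      obtain ⟨L, hL, j, hj, ha⟩ := h1
      exact ⟨L, hL, j, hj, ha.symm⟩
    have h2' : 2 ≤ a.toList.length ∧ a.toList <:+: st2.toList := by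
      rw [← cand2_iff st2 a]
      obtain ⟨i, hi, k, hk, ha⟩ := h2
      exact ⟨i, hi, k, hk, ha.symm⟩
    obtain ⟨hA, hlen⟩ := (candA_iff st1 a).2 hmid
    refine ⟨?_, (PySem.Str.isIn_iff_infix a st2).2 h2'.2, hlen⟩
    obtain ⟨i, hi, j, hj, ha⟩ := hA
    exact ⟨i, hi, j, hj, ha.symm⟩

-- ===== VERDICT (by name: the statement is the Claim_ definition above) =====
theorem es3_spec : Claim_equal_es3 := by
  intro st1 st2 _
  unfold Spec_es3 es3 es3_alt
  exact congrArg (PySem.Str.join " ") (sorted_arg_eq st1 st2)
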